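-- pv_equiv track=rewrite | github.com/danesolberg/VRP | VRP/helpers.py | compile_neighbor
-- ===== SOURCE A (Python) =====
-- def compile_neighbor(solution, swaps):
--     """
--     <swaps> parameter is in form of [(swap_index, new_route),] sorted ascending
--     by swap_index.
--     """
--     current_swap_idx = 0
--     new_solution = []
--     swap_len = len(swaps)
--     for i in range(len(solution)):
--         if current_swap_idx < swap_len and i == swaps[current_swap_idx][0]:
--             new_solution.append(swaps[current_swap_idx][1])
--             current_swap_idx += 1
--         else:
--             new_solution.append(solution[i])
--
--     return new_solution
-- ===== SOURCE B (Python) =====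
-- def compile_neighbor(solution, swaps):
--     """
--     Merge the sorted swaps into the solution by copying whole slices:
--     for each swap, copy the untouched run before it, then the new route.
--     Since swaps are sorted ascending by index, the first swap that cannot
--     be placed (index behind the write position or past the end) ends the merge.
--     """
--     out = []
--     pos = 0
--     for idx, route in swaps:
--         if not (pos <= idx < len(solution)):
--             break
--         out += solution[pos:idx]
--         out.append(route)
--         pos = idx + 1
--     out += solution[pos:]
--     return out
-- ===== Notes on version B (the rewrite author's own statement) =====
-- stated objective: alternative
-- what changed: Replaces A's per-index loop with a forward pointer into swaps by a merge that loops over the swaps themselves, copying whole untouched slices of the solution between applied swaps and stopping at the first inapplicable swap.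
import Mathlib
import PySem

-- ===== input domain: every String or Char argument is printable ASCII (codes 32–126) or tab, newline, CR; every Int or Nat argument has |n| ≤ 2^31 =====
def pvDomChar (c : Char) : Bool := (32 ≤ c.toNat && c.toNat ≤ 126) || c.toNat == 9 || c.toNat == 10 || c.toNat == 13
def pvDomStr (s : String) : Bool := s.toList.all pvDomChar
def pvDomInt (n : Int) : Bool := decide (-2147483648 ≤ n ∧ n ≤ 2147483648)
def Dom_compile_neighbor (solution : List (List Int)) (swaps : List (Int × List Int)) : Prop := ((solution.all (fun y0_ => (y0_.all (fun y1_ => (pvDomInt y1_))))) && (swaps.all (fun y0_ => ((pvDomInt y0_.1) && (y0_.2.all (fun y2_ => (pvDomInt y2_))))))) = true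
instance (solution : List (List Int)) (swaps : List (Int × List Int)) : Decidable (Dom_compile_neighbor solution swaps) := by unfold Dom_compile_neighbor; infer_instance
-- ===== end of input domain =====

-- B merges the swaps into the solution by copying whole slices between applied swaps,
-- looping over the swaps instead of over the solution indices (same cost; 'alternative').
-- Return value only; neither program mutates its arguments.

-- ===== PORT A =====
-- per-index loop with a forward pointer into swaps: state = (current_swap_idx, new_solution)
def compile_neighbor (solution : List (List Int)) (swaps : List (Int × List Int)) : List (List Int) :=
  let swap_len := swaps.length
  ((List.range solution.length).foldl
    (fun (st : Nat × List (List Int)) (i : Nat) =>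
      if h : st.1 < swap_len then
        if (swaps.get ⟨st.1, h⟩).1 = (i : Int) then
          (st.1 + 1, st.2 ++ [(swaps.get ⟨st.1, h⟩).2])
        else (st.1, st.2 ++ [solution.getD i []])
      else (st.1, st.2 ++ [solution.getD i []]))
    (0, [])).2

-- ===== PORT B =====
-- the for-loop over the swaps: state = (pos, out); a break (inapplicable swap) and the
-- natural end of the loop both fall through to the trailing 'out += solution[pos:]'
def cnMerge (sol : List (List Int)) : List (Int × List Int) → Int → List (List Int) → List (List Int)
  | [], pos, out => out ++ PySem.List.slice sol (some pos) none
  | (idx, route) :: rest, pos, out =>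
      if pos ≤ idx ∧ idx < (sol.length : Int) then
        cnMerge sol rest (idx + 1) (out ++ PySem.List.slice sol (some pos) (some idx) ++ [route])
      else out ++ PySem.List.slice sol (some pos) none

def compile_neighbor_alt (solution : List (List Int)) (swaps : List (Int × List Int)) : List (List Int) :=
  cnMerge solution swaps 0 []

-- ===== PRECONDITION & SPEC =====
def Spec_compile_neighbor (solution : List (List Int)) (swaps : List (Int × List Int)) (out : List (List Int)) : Prop := out = compile_neighbor_alt solution swaps
instance (solution : List (List Int)) (swaps : List (Int × List Int)) (out : List (List Int)) : Decidable (Spec_compile_neighbor solution swaps out) := by unfold Spec_compile_neighbor; infer_instance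

-- ===== CLAIM (what is proved, stated in full; the proofs are below) =====
def Claim_equal_compile_neighbor : Prop := ∀ (solution : List (List Int)) (swaps : List (Int × List Int)), Dom_compile_neighbor solution swaps → Spec_compile_neighbor solution swaps (compile_neighbor solution swaps)

-- ===== LEMMAS AND PROOFS =====

-- A's loop, rephrased recursively over the remaining index list and the remaining swap suffix
def aSim (solution : List (List Int)) : List Nat → List (Int × List Int) → List (List Int)
  | [], _ => []
  | j :: js, [] => solution.getD j [] :: aSim solution js []
  | j :: js, (idx, r) :: ss =>
      if idx = (j : Int) then r :: aSim solution js ss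
      else solution.getD j [] :: aSim solution js ((idx, r) :: ss)

theorem aSim_foldl (solution : List (List Int)) (swaps : List (Int × List Int)) :
    ∀ (js : List Nat) (p : Nat) (acc : List (List Int)),
      (js.foldl
        (fun (st : Nat × List (List Int)) (i : Nat) =>
          if h : st.1 < swaps.length then
            if (swaps.get ⟨st.1, h⟩).1 = (i : Int) then
              (st.1 + 1, st.2 ++ [(swaps.get ⟨st.1, h⟩).2])
            else (st.1, st.2 ++ [solution.getD i []])
          else (st.1, st.2 ++ [solution.getD i []]))
        (p, acc)).2 = acc ++ aSim solution js (swaps.drop p) := by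
  intro js
  induction js with
  | nil => intro p acc; simp [aSim]
  | cons j js ih =>
    intro p acc
    by_cases h : p < swaps.length
    · rcases hg : swaps.get ⟨p, h⟩ with ⟨idx, r⟩
      have hdrop : swaps.drop p = (idx, r) :: swaps.drop (p + 1) := by
        rw [← hg]; exact (List.drop_eq_getElem_cons h).trans rfl
      rw [List.foldl_cons]
      by_cases he : idx = (j : Int)
      · rw [dif_pos h, hg, if_pos he, ih, hdrop]
        simp [aSim, he]
      · rw [dif_pos h, hg, if_neg he, ih, hdrop]
        simp [aSim, he]
    · have hdrop : swaps.drop p = [] := List.drop_eq_nil_of_le (Nat.le_of_not_lt h)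
      rw [List.foldl_cons, dif_neg h, ih, hdrop]
      simp [aSim]

-- the untouched run [j, j+m) read through getD is a take of a drop
theorem map_getD_take_drop (sol : List (List Int)) :
    ∀ (m j : Nat), j + m ≤ sol.length →
      (List.range' j m).map (fun i => sol.getD i []) = (sol.drop j).take m := by
  intro m
  induction m with
  | zero => intro j _; simp
  | succ m ih =>
    intro j h
    have hj : j < sol.length := by omega
    have hdrop : sol.drop j = sol[j] :: sol.drop (j + 1) := List.drop_eq_getElem_cons hj
    rw [List.range'_succ, List.map_cons, ih (j + 1) (by omega), hdrop, List.take_succ_cons]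
    congr 1
    simp [List.getD_eq_getElem?_getD, hj]

theorem map_getD_drop (sol : List (List Int)) (j : Nat) (h : j ≤ sol.length) :
    (List.range' j (sol.length - j)).map (fun i => sol.getD i []) = sol.drop j := by
  rw [map_getD_take_drop sol (sol.length - j) j (by omega)]
  exact List.take_of_length_le (by simp)

-- no swaps left: A just copies the remaining elements
theorem aSim_nil (sol : List (List Int)) :
    ∀ js : List Nat, aSim sol js [] = js.map (fun i => sol.getD i []) := by
  intro js; induction js with
  | nil => simp [aSim]
  | cons j js ih => simp [aSim, ih]

-- the head swap never matches any remaining index: A copies and the pointer stalls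
theorem aSim_stall (sol : List (List Int)) (idx : Int) (r : List Int) (ss : List (Int × List Int)) :
    ∀ js : List Nat, (∀ i ∈ js, idx ≠ (i : Int)) →
      aSim sol js ((idx, r) :: ss) = js.map (fun i => sol.getD i []) := by
  intro js
  induction js with
  | nil => intro _; simp [aSim]
  | cons j js ih =>
    intro h
    have hne : idx ≠ (j : Int) := h j (by simp)
    simp only [aSim, if_neg hne, List.map_cons]
    rw [ih (fun i hi => h i (by simp [hi]))]

-- the head swap applies at index j+d: A copies the run [j, j+d), emits the route, advances
theorem aSim_run (sol : List (List Int)) (r : List Int) (ss : List (Int × List Int)) :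
    ∀ (d j : Nat), j + d < sol.length →
      aSim sol (List.range' j (sol.length - j)) ((((j + d : Nat) : Int), r) :: ss)
        = (List.range' j d).map (fun i => sol.getD i [])
          ++ r :: aSim sol (List.range' (j + d + 1) (sol.length - (j + d + 1))) ss := by
  intro d
  induction d with
  | zero =>
    intro j h
    have hrange : List.range' j (sol.length - j)
        = j :: List.range' (j + 1) (sol.length - (j + 1)) := by
      have : sol.length - j = (sol.length - (j + 1)) + 1 := by omega
      rw [this, List.range'_succ]
    rw [hrange]
    simp [aSim]
  | succ d ih =>
    intro j h
    have hrange : List.range' j (sol.length - j)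
        = j :: List.range' (j + 1) (sol.length - (j + 1)) := by
      have : sol.length - j = (sol.length - (j + 1)) + 1 := by omega
      rw [this, List.range'_succ]
    have hne : ((j + (d + 1) : Nat) : Int) ≠ (j : Int) := by
      push_cast; omega
    rw [hrange]
    simp only [aSim, if_neg hne]
    have hcast : ((j + (d + 1) : Nat) : Int) = (((j + 1) + d : Nat) : Int) := by push_cast; ring
    rw [hcast, ih (j + 1) (by omega), List.range'_succ, List.map_cons]
    have : (j + 1) + d + 1 = j + (d + 1) + 1 := by omega
    simp [this]

-- main invariant: A's remaining merge from index j equals B's loop with pos = j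
theorem aSim_eq_cnMerge (sol : List (List Int)) :
    ∀ (ss : List (Int × List Int)) (j : Nat) (out : List (List Int)), j ≤ sol.length →
      out ++ aSim sol (List.range' j (sol.length - j)) ss = cnMerge sol ss (j : Int) out := by
  intro ss
  induction ss with
  | nil =>
    intro j out hj
    rw [cnMerge, PySem.List.slice_from_natCast, aSim_nil, map_getD_drop sol j hj]
  | cons hd rest ih =>
    intro j out hj
    obtain ⟨idx, route⟩ := hd
    by_cases h : (j : Int) ≤ idx ∧ idx < (sol.length : Int)
    · obtain ⟨h1, h2⟩ := h
      have h0 : 0 ≤ idx := le_trans (by exact_mod_cast Nat.zero_le j) h1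
      obtain ⟨k, hk⟩ : ∃ k : Nat, idx = (k : Nat) := ⟨idx.toNat, by omega⟩
      subst hk
      have hjk : j ≤ k := by exact_mod_cast h1
      have hkn : k < sol.length := by exact_mod_cast h2
      have hd : k = j + (k - j) := by omega
      rw [cnMerge, if_pos ⟨h1, h2⟩]
      have hrun := aSim_run sol route rest (k - j) j (by omega)
      rw [← hd] at hrun
      rw [hrun]
      have hslice : PySem.List.slice sol (some (j : Int)) (some (k : Int))
          = (List.range' j (k - j)).map (fun i => sol.getD i []) := by
        rw [PySem.List.slice_natCast, map_getD_take_drop sol (k - j) j (by omega)]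
      have hcast : ((k : Int) + 1) = ((k + 1 : Nat) : Int) := by push_cast; ring
      rw [hcast, ← ih (k + 1) (out ++ PySem.List.slice sol (some (j : Int)) (some (k : Int)) ++ [route]) (by omega), hslice]
      simp
    · rw [cnMerge, if_neg h, PySem.List.slice_from_natCast]
      rw [aSim_stall sol idx route rest _ ?_, map_getD_drop sol j hj]
      intro i hi
      obtain ⟨hi1, hi2⟩ := List.mem_range'_1.mp hi
      have hin : i < sol.length := by omega
      intro he
      subst he
      rcases not_and_or.mp h with hc | hc
      · exact hc (by exact_mod_cast hi1)
      · exact hc (by exact_mod_cast hin)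

-- ===== VERDICT (by name: the statement is the Claim_ definition above) =====
theorem compile_neighbor_spec : Claim_equal_compile_neighbor := by
  intro solution swaps _
  unfold Spec_compile_neighbor compile_neighbor compile_neighbor_alt
  rw [aSim_foldl solution swaps (List.range solution.length) 0 []]
  rw [List.drop_zero, List.nil_append, List.range_eq_range']
  have h := aSim_eq_cnMerge solution swaps 0 [] (Nat.zero_le _)
  simpa using h
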